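-- pv_equiv track=rewrite | github.com/Noaarhk/algorithm_pr | python_algo_interview/21/noaarhk_remove_duplicate_letters.py | solution
-- ===== SOURCE A (Python) =====
-- import collections
--
-- def solution(s: str) -> str:
--     counter, seen, stack = collections.Counter(s), set(), []
--     for char in s:
--         counter[char] -= 1
--         if char in seen:
--             continue
--         # while stack -> stack에 글자가 있고, char<stack[-1] 이전에 스택에 쌓인 글자가 현재 글자보다 사전적으로 뒤의 글자이며, counter[stack[-1]]>0
--         while stack and char < stack[-1] and counter[stack[-1]] > 0:
--             seen.remove(stack.pop())
--         stack.append(char)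
--         seen.add(char)
--
--     return ''.join(stack)
-- ===== SOURCE B (Python) =====
-- def solution(s: str) -> str:
--     if not s:
--         return ''
--     counts = {}
--     for ch in s:
--         counts[ch] = counts.get(ch, 0) + 1
--     pos = 0
--     for i, ch in enumerate(s):
--         if ch < s[pos]:
--             pos = i
--         counts[ch] -= 1
--         if counts[ch] == 0:
--             break
--     c = s[pos]
--     return c + solution(s[pos + 1:].replace(c, ''))
-- ===== Notes on version B (the rewrite author's own statement) =====
-- stated objective: alternative
-- what changed: A's single-pass monotonic stack (with a counter and a seen-set) is replaced by the classic recursive greedy: scan to the first index whose character has no later occurrence, take the first occurrence of the smallest character up to there, output it and recurse on the remaining suffix with that character stripped out.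
import Mathlib
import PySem

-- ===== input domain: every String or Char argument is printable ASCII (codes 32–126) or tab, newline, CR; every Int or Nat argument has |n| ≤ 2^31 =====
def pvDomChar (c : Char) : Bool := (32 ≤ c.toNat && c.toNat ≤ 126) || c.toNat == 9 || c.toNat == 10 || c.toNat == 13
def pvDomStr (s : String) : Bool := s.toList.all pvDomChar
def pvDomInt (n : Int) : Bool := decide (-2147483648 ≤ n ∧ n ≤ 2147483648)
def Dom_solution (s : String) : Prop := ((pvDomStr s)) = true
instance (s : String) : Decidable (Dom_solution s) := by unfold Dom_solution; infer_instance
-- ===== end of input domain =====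

-- B replaces A's one-pass monotonic-stack greedy by the classic recursive greedy (pick the smallest
-- character of the prefix ending at the first exhausted character, then recurse on the stripped suffix);
-- objective: alternative (a genuinely different algorithm, similar cost).

-- ===== PORT A =====
-- inner `while stack and char < stack[-1] and counter[stack[-1]] > 0` loop (pops from the end,
-- removing popped characters from `seen`); stack[-1] on a nonempty stack is getLastD
def popLoop (counter : PySem.Dict Char Int) (char : Char)
    (seen : PySem.Set Char) (stack : List Char) : PySem.Set Char × List Char :=
  if _h : stack ≠ [] ∧ char < stack.getLastD ' ' ∧ counter.getD (stack.getLastD ' ') 0 > 0 then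
    popLoop counter char (PySem.Set.discard seen (stack.getLastD ' ')) stack.dropLast
  else (seen, stack)
termination_by stack.length
decreasing_by
  have : stack.length ≠ 0 := fun h0 => _h.1 (List.length_eq_zero_iff.mp h0)
  simp [List.length_dropLast]; omega

-- one iteration of A's `for char in s` loop over the state (counter, seen, stack)
def stepA (st : PySem.Dict Char Int × PySem.Set Char × List Char) (char : Char) :
    PySem.Dict Char Int × PySem.Set Char × List Char :=
  let counter := st.1.modify char 0 (· - 1)
  if PySem.Set.contains st.2.1 char then (counter, st.2.1, st.2.2)
  else
    let ss := popLoop counter char st.2.1 st.2.2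
    (counter, PySem.Set.add ss.1 char, ss.2 ++ [char])

def solution (s : String) : String :=
  let fin := s.toList.foldl stepA (PySem.Dict.counter s.toList, PySem.Set.empty, [])
  String.ofList fin.2.2  -- ''.join(stack)

-- ===== PORT B =====
-- B's `for i, ch in enumerate(s)` loop with its break: track pos of the smallest char seen,
-- decrement counts, stop when a count reaches 0
def altLoop (l : List Char) : List Char → PySem.Dict Char Int → Nat → Nat → Nat
  | [], _, _, pos => pos
  | ch :: rest, counts, i, pos =>
    let pos' := if ch < l.getD pos ' ' then i else pos
    let counts' := counts.modify ch 0 (· - 1)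
    if counts'.getD ch 0 = 0 then pos' else altLoop l rest counts' (i + 1) pos'

-- B's recursion, on the character list; s.replace(c, '') for the single character c is
-- exactly the removal of all occurrences of c, i.e. filter (· ≠ c)
def altCore (l : List Char) : List Char :=
  if hl : l = [] then []
  else
    let counts := l.foldl (fun d ch => d.insert ch (d.getD ch 0 + 1))
      (PySem.Dict.empty : PySem.Dict Char Int)
    let pos := altLoop l l counts 0 0
    let c := l.getD pos ' '
    c :: altCore ((l.drop (pos + 1)).filter (fun x => decide (x ≠ c)))
termination_by l.length
decreasing_by
  have h3 : l.length ≠ 0 := fun h0 => hl (List.length_eq_zero_iff.mp h0)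
  refine lt_of_le_of_lt (List.length_filter_le _ _) ?_
  rw [List.length_drop]; omega

def solution_alt (s : String) : String := String.ofList (altCore s.toList)

-- ===== PRECONDITION & SPEC =====
def Spec_solution (s : String) (out : String) : Prop := out = solution_alt s
instance (s : String) (out : String) : Decidable (Spec_solution s out) := by unfold Spec_solution; infer_instance

-- ===== CLAIM (what is proved, stated in full; the proofs are below) =====
def Claim_equal_solution : Prop := ∀ (s : String), Dom_solution s → Spec_solution s (solution s)

-- ===== LEMMAS AND PROOFS =====

-- Clean model of A's loop: stack kept top-first (head = top of stack); the counter value of x at the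
-- moment the current character's decrement has happened equals the count of x in the remaining input t,
-- so `counter[top] > 0` is `top ∈ t`.
def run : List Char → List Char → List Char
  | stk, [] => stk
  | stk, c :: t =>
    if c ∈ stk then run stk t
    else run (c :: stk.dropWhile (fun x => decide (c < x ∧ x ∈ t))) t

-- index j is the last occurrence of its character in l
def terminal (l : List Char) (j : Nat) : Prop := (l.drop (j + 1)).count (l.getD j ' ') = 0

-- invariant carried through the suffix run: c (the committed bottom of the stack) is never popped
def Jinv (c : Char) (T t : List Char) : Prop :=
  c ∉ T ∧ ((∃ g ∈ T, g ∉ t) ∨ c ∉ t ∨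
    ∃ k, k < t.length ∧ terminal t k ∧ ∀ j, j ≤ k → c ≤ t.getD j ' ')

lemma mem_dropWhile_of_not (p : Char → Bool) {a : Char} :
    ∀ {l : List Char}, a ∈ l → p a = false → a ∈ l.dropWhile p := by
  intro l hmem hpa
  induction l with
  | nil => cases hmem
  | cons x xs ih =>
    by_cases hx : p x = true
    · rw [List.dropWhile_cons_of_pos hx]
      rcases List.mem_cons.mp hmem with rfl | h
      · rw [hx] at hpa; cases hpa
      · exact ih h
    · rw [List.dropWhile_cons_of_neg hx]; exact hmem

lemma dropWhile_congr_mem {p q : Char → Bool} :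
    ∀ {l : List Char}, (∀ a ∈ l, p a = q a) → l.dropWhile p = l.dropWhile q := by
  intro l h
  induction l with
  | nil => rfl
  | cons x xs ih =>
    have hx := h x (List.mem_cons_self)
    by_cases hp : p x = true
    · rw [List.dropWhile_cons_of_pos hp, List.dropWhile_cons_of_pos (hx ▸ hp),
        ih (fun a ha => h a (List.mem_cons_of_mem _ ha))]
    · have hq : ¬ q x = true := fun hq => hp (hx ▸ hq)
      rw [List.dropWhile_cons_of_neg hp, List.dropWhile_cons_of_neg hq]

-- popLoop computes, on stack = rstk.reverse, the reversed dropWhile of rstk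
lemma popLoop_eq (cnt : PySem.Dict Char Int) (c : Char) :
    ∀ (rstk : List Char) (seen : PySem.Set Char),
      (∀ x : Char, x ∈ seen ↔ x ∈ rstk) → rstk.Nodup →
      ∃ seen', popLoop cnt c seen rstk.reverse =
          (seen', (rstk.dropWhile (fun x => decide (c < x ∧ cnt.getD x 0 > 0))).reverse) ∧
        (∀ x : Char, x ∈ seen' ↔ x ∈ rstk.dropWhile (fun x => decide (c < x ∧ cnt.getD x 0 > 0))) := by
  intro rstk
  induction rstk with
  | nil =>
    intro seen hseen _
    refine ⟨seen, ?_, ?_⟩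
    · rw [popLoop]; simp
    · simpa using hseen
  | cons a rstk ih =>
    intro seen hseen hnd
    have hrev : (a :: rstk).reverse = rstk.reverse ++ [a] := by simp
    have hne : rstk.reverse ++ [a] ≠ [] := by simp
    have hlast : (rstk.reverse ++ [a]).getLastD ' ' = a := List.getLastD_concat
    by_cases hQ : c < a ∧ cnt.getD a 0 > 0
    · have hcond : rstk.reverse ++ [a] ≠ [] ∧ c < (rstk.reverse ++ [a]).getLastD ' ' ∧
          cnt.getD ((rstk.reverse ++ [a]).getLastD ' ') 0 > 0 := by
        rw [hlast]; exact ⟨hne, hQ.1, hQ.2⟩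
      have hstep : popLoop cnt c seen ((a :: rstk).reverse) =
          popLoop cnt c (PySem.Set.discard seen a) rstk.reverse := by
        rw [hrev, popLoop, dif_pos hcond, hlast, List.dropLast_concat]
      have hanotin : a ∉ rstk := (List.nodup_cons.mp hnd).1
      have hseen' : ∀ x : Char, x ∈ PySem.Set.discard seen a ↔ x ∈ rstk := by
        intro x
        rw [PySem.Set.mem_discard, hseen x, List.mem_cons]
        constructor
        · rintro ⟨rfl | hx, hne'⟩
          · exact absurd rfl hne'
          · exact hx
        · intro hx; exact ⟨Or.inr hx, fun h => hanotin (h ▸ hx)⟩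
      obtain ⟨seen', h1, h2⟩ := ih (PySem.Set.discard seen a) hseen' (List.nodup_cons.mp hnd).2
      have hdw : (a :: rstk).dropWhile (fun x => decide (c < x ∧ cnt.getD x 0 > 0)) =
          rstk.dropWhile (fun x => decide (c < x ∧ cnt.getD x 0 > 0)) :=
        List.dropWhile_cons_of_pos (by simpa using hQ)
      exact ⟨seen', by rw [hstep, h1, hdw], by rw [hdw]; exact h2⟩
    · have hcond : ¬ (rstk.reverse ++ [a] ≠ [] ∧ c < (rstk.reverse ++ [a]).getLastD ' ' ∧
          cnt.getD ((rstk.reverse ++ [a]).getLastD ' ') 0 > 0) := by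
        rw [hlast]; rintro ⟨-, h1, h2⟩; exact hQ ⟨h1, h2⟩
      have hstep : popLoop cnt c seen ((a :: rstk).reverse) = (seen, (a :: rstk).reverse) := by
        rw [hrev, popLoop, dif_neg hcond]
      have hdw : (a :: rstk).dropWhile (fun x => decide (c < x ∧ cnt.getD x 0 > 0)) = a :: rstk :=
        List.dropWhile_cons_of_neg (by simpa using hQ)
      exact ⟨seen, by rw [hstep, hdw], by rw [hdw]; exact hseen⟩

-- A's fold equals the clean model
lemma foldA_run :
    ∀ (t rstk : List Char) (seen : PySem.Set Char) (cnt : PySem.Dict Char Int),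
      (∀ x : Char, cnt.getD x 0 = (t.count x : Int)) →
      (∀ x : Char, x ∈ seen ↔ x ∈ rstk) → rstk.Nodup →
      (t.foldl stepA (cnt, seen, rstk.reverse)).2.2 = (run rstk t).reverse := by
  intro t
  induction t with
  | nil => intro rstk seen cnt _ _ _; simp [run]
  | cons c t ih =>
    intro rstk seen cnt hcnt hseen hnd
    have hcnt' : ∀ x : Char, (cnt.modify c 0 (· - 1)).getD x 0 = (t.count x : Int) := by
      intro x
      rw [PySem.Dict.getD_modify]
      by_cases hx : x = c
      · subst hx; rw [if_pos rfl, hcnt]; simp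
      · rw [if_neg hx, hcnt]
        have hcx : c ≠ x := fun h => hx h.symm
        simp [hcx]
    by_cases hc : c ∈ rstk
    · have hcont : PySem.Set.contains seen c = true := by
        rw [PySem.Set.contains_eq_decide]; exact decide_eq_true ((hseen c).mpr hc)
      have hstep : stepA (cnt, seen, rstk.reverse) c = (cnt.modify c 0 (· - 1), seen, rstk.reverse) := by
        simp only [stepA, hcont]; rfl
      rw [List.foldl_cons, hstep, ih rstk seen _ hcnt' hseen hnd, run, if_pos hc]
    · have hcont : PySem.Set.contains seen c = false := by
        rw [PySem.Set.contains_eq_decide]; exact decide_eq_false (fun h => hc ((hseen c).mp h))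
      obtain ⟨seen', h1, h2⟩ := popLoop_eq (cnt.modify c 0 (· - 1)) c rstk seen hseen hnd
      have hPQ : (fun x => decide (c < x ∧ (cnt.modify c 0 (· - 1)).getD x 0 > 0)) =
          (fun x => decide (c < x ∧ x ∈ t)) := by
        funext x
        apply decide_eq_decide.mpr
        constructor
        · rintro ⟨h3, h4⟩; rw [hcnt' x] at h4
          exact ⟨h3, List.count_pos_iff.mp (by exact_mod_cast h4)⟩
        · rintro ⟨h3, h4⟩
          refine ⟨h3, ?_⟩; rw [hcnt' x]
          exact_mod_cast List.count_pos_iff.mpr h4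
      have hstep : stepA (cnt, seen, rstk.reverse) c =
          (cnt.modify c 0 (· - 1), PySem.Set.add seen' c,
            (c :: rstk.dropWhile (fun x => decide (c < x ∧ x ∈ t))).reverse) := by
        simp only [stepA, hcont]
        rw [if_neg (by simp)]
        simp only [h1, List.reverse_cons, hPQ]
      rw [hPQ] at h2
      have hdw : List.Sublist (rstk.dropWhile (fun x => decide (c < x ∧ x ∈ t))) rstk :=
        List.dropWhile_sublist _
      have hnd' : (c :: rstk.dropWhile (fun x => decide (c < x ∧ x ∈ t))).Nodup :=
        List.nodup_cons.mpr ⟨fun h => hc (hdw.subset h), hnd.sublist hdw⟩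
      have hseen2 : ∀ x : Char, x ∈ PySem.Set.add seen' c ↔
          x ∈ c :: rstk.dropWhile (fun x => decide (c < x ∧ x ∈ t)) := by
        intro x
        rw [PySem.Set.mem_add, h2 x, List.mem_cons]
        tauto
      rw [List.foldl_cons, hstep, ih _ _ _ hcnt' hseen2 hnd', run, if_neg hc]

lemma terminal_last (l : List Char) (hl : l ≠ []) : terminal l (l.length - 1) := by
  unfold terminal
  have h3 : l.length ≠ 0 := fun h0 => hl (List.length_eq_zero_iff.mp h0)
  have : l.length - 1 + 1 = l.length := by omega
  rw [this, List.drop_length]; rfl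

-- B's loop: break happens at b = the least "last occurrence" index, and the returned pos is the
-- first position of the minimum character of l[0..b]
lemma altLoop_spec (l : List Char) :
    ∀ (rest : List Char) (i pos : Nat) (cnt : PySem.Dict Char Int),
      rest = l.drop i →
      (∀ x : Char, cnt.getD x 0 = (rest.count x : Int)) →
      pos ≤ i → pos < l.length →
      (∀ j, j < i → l.getD pos ' ' ≤ l.getD j ' ') →
      (∀ j, j < pos → l.getD pos ' ' < l.getD j ' ') →
      (∀ j, j < i → ¬ terminal l j) →
      ∃ b, b < l.length ∧ terminal l b ∧ (∀ j, j < b → ¬ terminal l j) ∧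
        altLoop l rest cnt i pos ≤ b ∧ altLoop l rest cnt i pos < l.length ∧
        (∀ j, j ≤ b → l.getD (altLoop l rest cnt i pos) ' ' ≤ l.getD j ' ') ∧
        (∀ j, j < altLoop l rest cnt i pos → l.getD (altLoop l rest cnt i pos) ' ' < l.getD j ' ') := by
  intro rest
  induction rest with
  | nil =>
    intro i pos cnt hrest hcnt hposle hposlt hmin hstrict hnoterm
    exfalso
    have hlen : l.length ≤ i := List.drop_eq_nil_iff.mp hrest.symm
    have hl : l ≠ [] := by
      intro h0; rw [h0] at hposlt; simp at hposlt
    exact hnoterm (l.length - 1) (by have := List.length_pos_of_ne_nil hl; omega) (terminal_last l hl)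
  | cons ch rest' ih =>
    intro i pos cnt hrest hcnt hposle hposlt hmin hstrict hnoterm
    have hil : i < l.length := by
      by_contra h
      have h0 : l.drop i = [] := List.drop_eq_nil_iff.mpr (by omega)
      rw [← hrest] at h0; cases h0
    have hchget : l.getD i ' ' = ch := by
      have h0 : (l.drop i).head? = some ch := by rw [← hrest]; rfl
      rw [List.getD_eq_getElem?_getD, ← List.head?_drop, h0]; rfl
    have hrest' : rest' = l.drop (i + 1) := by
      have h0 : (l.drop i).tail = l.drop (i + 1) := List.tail_drop
      rw [← h0, ← hrest]
      rfl
    have hcnt' : ∀ x : Char, (cnt.modify ch 0 (· - 1)).getD x 0 = (rest'.count x : Int) := by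
      intro x
      rw [PySem.Dict.getD_modify]
      by_cases hx : x = ch
      · subst hx; rw [if_pos rfl, hcnt]; simp
      · rw [if_neg hx, hcnt]
        have hcx : ch ≠ x := fun h => hx h.symm
        simp [hcx]
    have hterm_iff : terminal l i ↔ (cnt.modify ch 0 (· - 1)).getD ch 0 = 0 := by
      rw [hcnt' ch]
      unfold terminal
      rw [hchget, ← hrest']
      exact ⟨fun h => by exact_mod_cast h, fun h => by exact_mod_cast h⟩
    by_cases hlt : ch < l.getD pos ' '
    · -- pos' = i
      have hmin' : ∀ j, j < i + 1 → l.getD i ' ' ≤ l.getD j ' ' := by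
        intro j hj
        rcases Nat.lt_succ_iff_lt_or_eq.mp hj with hj | rfl
        · rw [hchget]; exact le_of_lt (lt_of_lt_of_le hlt (hmin j hj))
        · exact le_refl _
      have hstrict' : ∀ j, j < i → l.getD i ' ' < l.getD j ' ' := by
        intro j hj
        rw [hchget]; exact lt_of_lt_of_le hlt (hmin j hj)
      by_cases hbrk : (cnt.modify ch 0 (· - 1)).getD ch 0 = 0
      · have hres : altLoop l (ch :: rest') cnt i pos = i := by
          simp only [altLoop, if_pos hlt, if_pos hbrk]
        refine ⟨i, hil, hterm_iff.mpr hbrk, hnoterm, ?_⟩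
        rw [hres]
        exact ⟨le_refl _, hil, fun j hj => hmin' j (by omega), hstrict'⟩
      · have hres : altLoop l (ch :: rest') cnt i pos =
            altLoop l rest' (cnt.modify ch 0 (· - 1)) (i + 1) i := by
          simp only [altLoop, if_pos hlt, if_neg hbrk]
        rw [hres]
        refine ih (i + 1) i _ hrest' hcnt' (by omega) hil hmin' hstrict' ?_
        intro j hj
        rcases Nat.lt_succ_iff_lt_or_eq.mp hj with hj | rfl
        · exact hnoterm j hj
        · exact fun ht => hbrk (hterm_iff.mp ht)
    · -- pos' = pos
      have hmin' : ∀ j, j < i + 1 → l.getD pos ' ' ≤ l.getD j ' ' := by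
        intro j hj
        rcases Nat.lt_succ_iff_lt_or_eq.mp hj with hj | rfl
        · exact hmin j hj
        · rw [hchget]; exact le_of_not_gt hlt
      by_cases hbrk : (cnt.modify ch 0 (· - 1)).getD ch 0 = 0
      · have hres : altLoop l (ch :: rest') cnt i pos = pos := by
          simp only [altLoop, if_neg hlt, if_pos hbrk]
        refine ⟨i, hil, hterm_iff.mpr hbrk, hnoterm, ?_⟩
        rw [hres]
        exact ⟨hposle, hposlt, fun j hj => hmin' j (by omega), hstrict⟩
      · have hres : altLoop l (ch :: rest') cnt i pos =
            altLoop l rest' (cnt.modify ch 0 (· - 1)) (i + 1) pos := by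
          simp only [altLoop, if_neg hlt, if_neg hbrk]
        rw [hres]
        refine ih (i + 1) pos _ hrest' hcnt' (by omega) hposlt hmin' hstrict ?_
        intro j hj
        rcases Nat.lt_succ_iff_lt_or_eq.mp hj with hj | rfl
        · exact hnoterm j hj
        · exact fun ht => hbrk (hterm_iff.mp ht)

-- every character occurring before k whose occurrences are over by index k yields a terminal index < k
lemma exists_term_before (l : List Char) (y : Char) :
    ∀ k, y ∈ l.take k → (l.drop k).count y = 0 →
      ∃ j, j < k ∧ l.getD j ' ' = y ∧ terminal l j := by
  intro k
  induction k with
  | zero => intro h; simp at h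
  | succ k ih =>
    intro hmem hcnt
    by_cases hk : y ∈ l.take k
    · by_cases hc : (l.drop k).count y = 0
      · obtain ⟨j, h1, h2, h3⟩ := ih hk hc
        exact ⟨j, by omega, h2, h3⟩
      · have hkl : k < l.length := by
          by_contra h
          rw [List.drop_eq_nil_iff.mpr (by omega)] at hc
          simp at hc
        have hdropk : l.drop k = l[k] :: l.drop (k + 1) := List.drop_eq_getElem_cons hkl
        have hky : l[k] = y := by
          rw [hdropk, List.count_cons, hcnt] at hc
          by_contra hne
          simp at hc
          exact hne hc
        refine ⟨k, by omega, ?_, ?_⟩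
        · rw [List.getD_eq_getElem l ' ' hkl, hky]
        · unfold terminal
          rw [List.getD_eq_getElem l ' ' hkl, hky]
          exact hcnt
    · have hkl : k < l.length := by
        by_contra h
        rw [List.take_of_length_le (by omega)] at hmem hk
        exact hk hmem
      have htake : l.take (k + 1) = l.take k ++ [l[k]] := by
        rw [List.take_add_one, List.getElem?_eq_getElem hkl]
        rfl
      have hky : l[k] = y := by
        rw [htake, List.mem_append] at hmem
        rcases hmem with h | h
        · exact absurd h hk
        · exact (List.mem_singleton.mp h).symm
      refine ⟨k, by omega, ?_, ?_⟩
      · rw [List.getD_eq_getElem l ' ' hkl, hky]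
      · unfold terminal
        rw [List.getD_eq_getElem l ' ' hkl, hky]
        exact hcnt

-- processing the prefix up to and including the chosen character c empties the stack down to [c]
lemma run_prefix (c : Char) (t : List Char) :
    ∀ (u stk : List Char),
      (∀ x ∈ stk, c < x ∧ x ∈ t) → (∀ y ∈ u, c < y ∧ y ∈ t) →
      run stk (u ++ c :: t) = run [c] t := by
  intro u
  induction u with
  | nil =>
    intro stk hstk _
    show run stk (c :: t) = run [c] t
    rw [run]
    have hcn : c ∉ stk := fun h => lt_irrefl c (hstk c h).1
    have hall : stk.dropWhile (fun x => decide (c < x ∧ x ∈ t)) = [] :=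
      List.dropWhile_eq_nil_iff.mpr (fun x hx => by simpa using hstk x hx)
    rw [if_neg hcn, hall]
  | cons y u ih =>
    intro stk hstk hu
    rw [List.cons_append, run]
    by_cases hy : y ∈ stk
    · rw [if_pos hy]
      exact ih stk hstk (fun z hz => hu z (List.mem_cons_of_mem _ hz))
    · rw [if_neg hy]
      apply ih
      · intro x hx
        rcases List.mem_cons.mp hx with rfl | hx2
        · exact hu x List.mem_cons_self
        · exact hstk x ((List.dropWhile_sublist _).subset hx2)
      · exact fun z hz => hu z (List.mem_cons_of_mem _ hz)

-- under the invariant, the bottom c is never popped and the rest of the run is the run on t without c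
lemma run_protected (c : Char) :
    ∀ (t T : List Char), Jinv c T t →
      run (T ++ [c]) t = run T (t.filter (fun x => decide (x ≠ c))) ++ [c] := by
  intro t
  induction t with
  | nil => intro T _; simp [run]
  | cons x t ih =>
    intro T hJ
    obtain ⟨hcT, hdisj⟩ := hJ
    -- shifting facts about the third disjunct
    have hshift : ∀ k, k < (x :: t).length → terminal (x :: t) k →
        (∀ j, j ≤ k → c ≤ (x :: t).getD j ' ') →
        (k = 0 ∧ (x :: t).drop 1 = t ∧ t.count x = 0) ∨
        (∃ k', k' < t.length ∧ terminal t k' ∧ ∀ j, j ≤ k' → c ≤ t.getD j ' ') := by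
      intro k hk hterm hge
      cases k with
      | zero =>
        left
        refine ⟨rfl, rfl, ?_⟩
        unfold terminal at hterm
        simpa using hterm
      | succ k' =>
        right
        refine ⟨k', by simpa using hk, ?_, fun j hj => hge (j + 1) (by omega)⟩
        unfold terminal at hterm ⊢
        simpa using hterm
    have hc_le_x : (∃ k, k < (x :: t).length ∧ terminal (x :: t) k ∧
        ∀ j, j ≤ k → c ≤ (x :: t).getD j ' ') → c ≤ x := by
      rintro ⟨k, _, _, hge⟩
      simpa using hge 0 (Nat.zero_le _)
    by_cases hxc : x = c
    · subst hxc
      rw [run, if_pos (by simp), List.filter_cons, if_neg (by simp)]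
      apply ih
      refine ⟨hcT, ?_⟩
      rcases hdisj with ⟨g, hg, hgt⟩ | hct | ⟨k, hk, hterm, hge⟩
      · exact Or.inl ⟨g, hg, fun h => hgt (List.mem_cons_of_mem _ h)⟩
      · exact absurd List.mem_cons_self hct
      · rcases hshift k hk hterm hge with ⟨_, _, hcnt0⟩ | h3
        · exact Or.inr (Or.inl (List.count_eq_zero.mp hcnt0))
        · exact Or.inr (Or.inr h3)
    · by_cases hxT : x ∈ T
      · rw [run, if_pos (by simp [hxT]), List.filter_cons, if_pos (by simp [hxc]), run, if_pos hxT]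
        apply ih
        refine ⟨hcT, ?_⟩
        rcases hdisj with ⟨g, hg, hgt⟩ | hct | ⟨k, hk, hterm, hge⟩
        · exact Or.inl ⟨g, hg, fun h => hgt (List.mem_cons_of_mem _ h)⟩
        · exact Or.inr (Or.inl (fun h => hct (List.mem_cons_of_mem _ h)))
        · rcases hshift k hk hterm hge with ⟨_, _, hcnt0⟩ | h3
          · exact Or.inl ⟨x, hxT, List.count_eq_zero.mp hcnt0⟩
          · exact Or.inr (Or.inr h3)
      · -- x pushed on both sides
        have hxTc : x ∉ T ++ [c] := by
          simp [hxT, hxc]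
        have hPP' : ∀ z ∈ T, (fun z => decide (x < z ∧ z ∈ t)) z =
            (fun z => decide (x < z ∧ z ∈ t.filter (fun y => decide (y ≠ c)))) z := by
          intro z hz
          have hzc : z ≠ c := fun h => hcT (h ▸ hz)
          apply decide_eq_decide.mpr
          constructor
          · rintro ⟨h1, h2⟩
            exact ⟨h1, List.mem_filter.mpr ⟨h2, by simpa using hzc⟩⟩
          · rintro ⟨h1, h2⟩
            exact ⟨h1, (List.mem_filter.mp h2).1⟩
        have hdwT : T.dropWhile (fun z => decide (x < z ∧ z ∈ t)) =
            T.dropWhile (fun z => decide (x < z ∧ z ∈ t.filter (fun y => decide (y ≠ c)))) :=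
          dropWhile_congr_mem hPP'
        -- the combined stack after the push
        have hstack : (T ++ [c]).dropWhile (fun z => decide (x < z ∧ z ∈ t)) =
            T.dropWhile (fun z => decide (x < z ∧ z ∈ t)) ++ [c] := by
          rw [List.dropWhile_append]
          by_cases hemp : T.dropWhile (fun z => decide (x < z ∧ z ∈ t)) = []
          · have hPc : (decide (x < c ∧ c ∈ t)) = false := by
              apply decide_eq_false
              rcases hdisj with ⟨g, hg, hgt⟩ | hct | h3
              · exfalso
                have hPg := List.dropWhile_eq_nil_iff.mp hemp g hg
                have hgnt : g ∉ t := fun h => hgt (List.mem_cons_of_mem _ h)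
                simp [hgnt] at hPg
              · rintro ⟨-, h2⟩
                exact hct (List.mem_cons_of_mem _ h2)
              · rintro ⟨h1, -⟩
                exact absurd h1 (not_lt_of_ge (hc_le_x h3))
            rw [hemp]
            have hie : (List.nil (α := Char)).isEmpty = true := rfl
            rw [if_pos hie]
            simp only [List.dropWhile_cons, hPc]
            simp
          · rw [if_neg (by simpa [List.isEmpty_iff] using hemp)]
        rw [run, if_neg hxTc, List.filter_cons, if_pos (by simp [hxc]), run, if_neg hxT,
          hstack, ← List.cons_append, ← hdwT]
        apply ih
        constructor
        · intro h
          rcases List.mem_cons.mp h with h | h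
          · exact hxc h.symm
          · exact hcT ((List.dropWhile_sublist _).subset h)
        · rcases hdisj with ⟨g, hg, hgt⟩ | hct | ⟨k, hk, hterm, hge⟩
          · have hgnt : g ∉ t := fun h => hgt (List.mem_cons_of_mem _ h)
            have hgin : g ∈ T.dropWhile (fun z => decide (x < z ∧ z ∈ t)) :=
              mem_dropWhile_of_not _ hg (by simp [hgnt])
            exact Or.inl ⟨g, List.mem_cons_of_mem _ hgin, hgnt⟩
          · exact Or.inr (Or.inl (fun h => hct (List.mem_cons_of_mem _ h)))
          · rcases hshift k hk hterm hge with ⟨_, _, hcnt0⟩ | h3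
            · exact Or.inl ⟨x, List.mem_cons_self, List.count_eq_zero.mp hcnt0⟩
            · exact Or.inr (Or.inr h3)

lemma getD_drop_char (l : List Char) (m j : Nat) : (l.drop m).getD j ' ' = l.getD (m + j) ' ' := by
  rw [List.getD_eq_getElem?_getD, List.getD_eq_getElem?_getD, List.getElem?_drop]

lemma altCore_eq_run_aux : ∀ (n : Nat) (l : List Char), l.length ≤ n →
    altCore l = (run [] l).reverse := by
  intro n
  induction n with
  | zero =>
    intro l hl
    have h0 : l = [] := List.length_eq_zero_iff.mp (by omega)
    subst h0
    simp [altCore, run]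
  | succ n ih =>
    intro l hl
    by_cases hnil : l = []
    · subst hnil; simp [altCore, run]
    · set cnts := l.foldl (fun d ch => d.insert ch (d.getD ch 0 + 1))
        (PySem.Dict.empty : PySem.Dict Char Int) with hcntsdef
      have hcnts : ∀ x : Char, cnts.getD x 0 = (l.count x : Int) := by
        intro x
        rw [hcntsdef, PySem.Dict.foldl_insert_getD_add_one_eq_counter, PySem.Dict.getD_counter]
      have hlpos : 0 < l.length := List.length_pos_of_ne_nil hnil
      obtain ⟨b, hbl, hbterm, hbnot, hpb, hpl, hple, hplt⟩ :=
        altLoop_spec l l 0 0 cnts (by simp) hcnts (le_refl 0) hlpos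
          (fun j hj => absurd hj (Nat.not_lt_zero j))
          (fun j hj => absurd hj (Nat.not_lt_zero j))
          (fun j hj => absurd hj (Nat.not_lt_zero j))
      set p := altLoop l l cnts 0 0 with hpdef
      set c := l.getD p ' ' with hcdef
      have hdecomp : l = l.take p ++ c :: l.drop (p + 1) := by
        conv_lhs => rw [← List.take_append_drop p l]
        rw [List.drop_eq_getElem_cons hpl, hcdef, List.getD_eq_getElem l ' ' hpl]
      have hu : ∀ y ∈ l.take p, c < y ∧ y ∈ l.drop (p + 1) := by
        intro y hy
        obtain ⟨j, hj, hjy⟩ := List.mem_take_iff_getElem.mp hy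
        have hjp : j < p := lt_of_lt_of_le hj (min_le_left _ _)
        have hclt : c < y := by
          have h1 := hplt j hjp
          rwa [List.getD_eq_getElem l ' ' (lt_of_lt_of_le hj (min_le_right _ _)), hjy] at h1
        refine ⟨hclt, ?_⟩
        by_contra hyt
        have hcnt0 : (l.drop (p + 1)).count y = 0 := List.count_eq_zero.mpr hyt
        have htake1 : l.take (p + 1) = l.take p ++ [l[p]] := by
          rw [List.take_add_one, List.getElem?_eq_getElem hpl]
          rfl
        have hytake : y ∈ l.take (p + 1) := by
          rw [htake1]; exact List.mem_append_left _ hy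
        obtain ⟨j2, hj2, hj2y, hj2term⟩ := exists_term_before l y (p + 1) hytake hcnt0
        have hj2p : j2 ≠ p := by
          intro h; subst h
          rw [← hcdef] at hj2y
          exact absurd hj2y (ne_of_lt hclt)
        exact hbnot j2 (by omega) hj2term
      have hrfx : run [] l = run [c] (l.drop (p + 1)) := by
        conv_lhs => rw [hdecomp]
        exact run_prefix c (l.drop (p + 1)) (l.take p) [] (by simp) hu
      have hJ : Jinv c [] (l.drop (p + 1)) := by
        refine ⟨by simp, ?_⟩
        by_cases hpb' : p = b
        · refine Or.inr (Or.inl ?_)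
          apply List.count_eq_zero.mp
          unfold terminal at hbterm
          rw [hcdef, hpb']
          exact hbterm
        · have hpltb : p < b := lt_of_le_of_ne hpb hpb'
          refine Or.inr (Or.inr ⟨b - (p + 1), ?_, ?_, ?_⟩)
          · rw [List.length_drop]; omega
          · unfold terminal
            rw [getD_drop_char, List.drop_drop]
            have h1 : p + 1 + (b - (p + 1)) = b := by omega
            have h2 : p + 1 + (b - (p + 1) + 1) = b + 1 := by omega
            rw [h1, h2]
            exact hbterm
          · intro j hj
            rw [getD_drop_char]
            exact hple (p + 1 + j) (by omega)
      have hprot : run [c] (l.drop (p + 1)) =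
          run [] ((l.drop (p + 1)).filter (fun x => decide (x ≠ c))) ++ [c] := by
        have h1 := run_protected c (l.drop (p + 1)) [] hJ
        simpa using h1
      have hrec : altCore ((l.drop (p + 1)).filter (fun x => decide (x ≠ c))) =
          (run [] ((l.drop (p + 1)).filter (fun x => decide (x ≠ c)))).reverse := by
        apply ih
        have h1 := List.length_filter_le (fun x => decide (x ≠ c)) (l.drop (p + 1))
        rw [List.length_drop] at h1
        omega
      have hunfold : altCore l = c :: altCore ((l.drop (p + 1)).filter (fun x => decide (x ≠ c))) := by
        rw [altCore]
        rw [dif_neg hnil]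
      rw [hunfold, hrfx, hprot, List.reverse_append, hrec]
      rfl

lemma altCore_eq_run (l : List Char) : altCore l = (run [] l).reverse :=
  altCore_eq_run_aux l.length l (le_refl _)

lemma solution_eq (s : String) : solution s = String.ofList ((run [] s.toList).reverse) := by
  have h1 := foldA_run s.toList [] PySem.Set.empty (PySem.Dict.counter s.toList)
    (fun x => PySem.Dict.getD_counter _ _) (fun x => by simp [PySem.Set.empty]) List.nodup_nil
  have h2 : (s.toList.foldl stepA (PySem.Dict.counter s.toList, PySem.Set.empty, ([] : List Char))).2.2
      = (run [] s.toList).reverse := by simpa using h1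
  show String.ofList (s.toList.foldl stepA (PySem.Dict.counter s.toList, PySem.Set.empty, ([] : List Char))).2.2 = _
  rw [h2]

-- ===== VERDICT (by name: the statement is the Claim_ definition above) =====
theorem solution_spec : Claim_equal_solution := by
  intro s _
  unfold Spec_solution solution_alt
  rw [solution_eq, altCore_eq_run]
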